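-- pv_equiv track=rewrite | github.com/NadTr/Advent-of-code | 2016/day9/part1.py | decompress_file
-- ===== SOURCE A (Python) =====
-- def decompress_file(line):
--     letters = list(line)
--     decompressed_line = ""
--     i = 0
--     while i in range(len(letters)):
--         if letters[i]=="(":
--             marker =""
--             index = i + 1
--             while letters[index] !=")":
--                 marker += letters[index]
--                 index += 1
--             marker = marker.split("x")
--             str_to_repeat = ""
--             for j in range(index + 1, index+ 1 + int(marker[0])):
--                 if j < len(letters):
--                     str_to_repeat += letters[j]
--             decompressed_line += "".join(int(marker[1]) * str_to_repeat )
--             i = index + int(marker[0]) + 1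
--         else:
--             decompressed_line += "".join(letters[i])
--             i += 1
--     return decompressed_line
-- ===== SOURCE B (Python) =====
-- def decompress_file(line):
--     out = []
--     i = 0
--     while 0 <= i < len(line):
--         if line[i] == "(":
--             close = line.index(")", i)
--             parts = line[i + 1:close].split("x")
--             a = int(parts[0])
--             b = int(parts[1])
--             out.append(line[close + 1:close + 1 + a] * b)
--             i = close + 1 + a
--         else:
--             out.append(line[i])
--             i += 1
--     return "".join(out)
-- ===== Notes on version B (the rewrite author's own statement) =====
-- stated objective: faster
-- what changed: B replaces A's three hand-rolled character loops (outer char-by-char scan with string +=, inner marker-building while, inner guarded for building the repeat chunk) with str.index to locate the marker end and slicing to extract the marker and the chunk, collecting the pieces in a list joined once at the end.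
-- outside the precondition, e.g. on decompress_file('(-9x2)abcdefgh'): A returns '', B returns 'abcdeabcde'; on decompress_file('('): A raises IndexError, B raises ValueError
import Mathlib
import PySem

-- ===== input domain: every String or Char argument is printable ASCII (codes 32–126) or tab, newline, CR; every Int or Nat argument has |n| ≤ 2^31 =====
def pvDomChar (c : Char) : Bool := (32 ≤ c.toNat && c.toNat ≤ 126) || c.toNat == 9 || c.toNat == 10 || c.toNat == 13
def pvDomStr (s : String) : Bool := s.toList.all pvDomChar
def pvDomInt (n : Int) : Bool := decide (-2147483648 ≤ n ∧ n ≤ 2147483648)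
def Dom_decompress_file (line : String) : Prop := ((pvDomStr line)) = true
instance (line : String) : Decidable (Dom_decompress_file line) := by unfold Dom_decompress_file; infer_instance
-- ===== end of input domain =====

-- B replaces A's three character-by-character loops (with string +=) by index/slice extraction of
-- each marker and chunk, collected in a list joined once at the end (measured faster at large sizes).

-- ===== PORT A =====
-- the inner `while letters[index] != ")"` loop of A; fuel-guarded (on Pre_ the first ')' is
-- reached before fuel runs out; letters[index] out of range = IndexError ⇒ junk, outside Pre_)
def pvAScan (l : List Char) (marker : List Char) (index : Nat) : Nat → List Char × Nat
  | 0 => (marker, index)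
  | fuel + 1 =>
    match PySem.List.pyGet? l (index : Int) with
    | none => (marker, index)
    | some c => if c ≠ ')' then pvAScan l (marker ++ [c]) (index + 1) fuel else (marker, index)

-- the outer `while i in range(len(letters))` loop of A; fuel = len(letters) suffices on Pre_
def pvALoop (l : List Char) (acc : List Char) (i : Int) : Nat → List Char
  | 0 => acc
  | fuel + 1 =>
    if 0 ≤ i ∧ i < (l.length : Int) then
      if PySem.List.pyGetD l i ' ' = '(' then
        let p := pvAScan l [] (i + 1).toNat l.length
        let marker := PySem.Chars.splitOn p.1 ['x']
        match PySem.List.pyGet? marker 0, PySem.List.pyGet? marker 1 with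
        | some m0, some m1 =>
          match PySem.Int.ofChars? m0, PySem.Int.ofChars? m1 with
          | some a, some b =>
            let strRep := (PySem.List.pyRange ((p.2 : Int) + 1) ((p.2 : Int) + 1 + a) 1).foldl
              (fun s j => if j < (l.length : Int) then s ++ [PySem.List.pyGetD l j ' '] else s) []
            pvALoop l (acc ++ PySem.List.pyRepeat strRep b) ((p.2 : Int) + a + 1) fuel
          | _, _ => acc   -- ValueError in int(): outside Pre_
        | _, _ => acc     -- IndexError on marker[0]/marker[1]: outside Pre_
      else
        pvALoop l (acc ++ [PySem.List.pyGetD l i ' ']) (i + 1) fuel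
    else acc

def decompress_file (line : String) : String :=
  String.ofList (pvALoop line.toList [] 0 line.toList.length)

-- ===== PORT B =====
-- B's while loop; line.index(")", i) is rendered exactly as i + first index of ')' in line[i:]
def pvBLoop (l : List Char) (i : Int) : Nat → List (List Char)
  | 0 => []
  | fuel + 1 =>
    if 0 ≤ i ∧ i < (l.length : Int) then
      if PySem.List.pyGetD l i ' ' = '(' then
        match PySem.List.index? (l.drop i.toNat) ')' with
        | none => []        -- ValueError from line.index: outside Pre_
        | some k =>
          let close : Int := i + (k : Int)
          let parts := PySem.Chars.splitOn (PySem.List.slice l (some (i + 1)) (some close)) ['x']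
          match PySem.List.pyGet? parts 0, PySem.List.pyGet? parts 1 with
          | some p0, some p1 =>
            match PySem.Int.ofChars? p0, PySem.Int.ofChars? p1 with
            | some a, some b =>
              PySem.List.pyRepeat (PySem.List.slice l (some (close + 1)) (some (close + 1 + a))) b
                :: pvBLoop l (close + 1 + a) fuel
            | _, _ => []    -- ValueError in int(): outside Pre_
          | _, _ => []      -- IndexError on parts[1]: outside Pre_
      else [PySem.List.pyGetD l i ' '] :: pvBLoop l (i + 1) fuel
    else []

def decompress_file_alt (line : String) : String :=
  String.ofList (PySem.Chars.join [] (pvBLoop line.toList 0 line.toList.length))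

-- ===== PRECONDITION & SPEC =====
-- shape of one (AxB) marker opening at position i: a ')' follows at offset k0, the text between
-- splits on 'x' into at least two int() literals a and b (a is the take-count, b the repeat count)
def pvMarkerInfo (l : List Char) (i : Nat) : Option (Nat × Int × Int) :=
  match PySem.List.index? (l.drop (i + 1)) ')' with
  | none => none
  | some k0 =>
    let parts := PySem.Chars.splitOn ((l.drop (i + 1)).take k0) ['x']
    match PySem.List.pyGet? parts 0, PySem.List.pyGet? parts 1 with
    | some p0, some p1 =>
      match PySem.Int.ofChars? p0, PySem.Int.ofChars? p1 with
      | some a, some b => some (k0, a, b)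
      | _, _ => none
    | _, _ => none

-- the GRAMMAR of a well-formed compressed text (a shape condition on the string; it computes no
-- output): from position i it is either exhausted, a plain character followed by a well-formed
-- rest, or a complete (AxB) marker with A ≥ 0 followed by its A-character chunk and a well-formed
-- rest; `segs` only bounds the number of grammar segments, and since each segment covers at least
-- one character, `l.length` segments always suffice
def pvWellFormedFrom (l : List Char) (i : Nat) : Nat → Bool
  | 0 => true
  | segs + 1 =>
    if i < l.length then
      if l.getD i ' ' = '(' then
        match pvMarkerInfo l i with
        | none => false
        | some (k0, a, _b) => decide (0 ≤ a) && pvWellFormedFrom l (i + k0 + 2 + a.toNat) segs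
      else pvWellFormedFrom l (i + 1) segs
    else true

-- Pre_ excludes exactly the inputs on which A raises at some marker it actually scans (no ')'
-- ahead, or a field int() rejects), plus markers with a NEGATIVE take-count, where A's behaviour
-- (an empty chunk and a jump backwards into already-read text, possibly forever) and B's Python
-- negative-slice wraparound are both accidental; '(' inside skipped chunks is unconstrained.
def Pre_decompress_file (line : String) : Prop :=
  pvWellFormedFrom line.toList 0 line.toList.length = true
instance (line : String) : Decidable (Pre_decompress_file line) := by
  unfold Pre_decompress_file; infer_instance

def pvWitness_decompress_file : String := "(2x3)abc"

def Spec_decompress_file (line : String) (out : String) : Prop := out = decompress_file_alt line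
instance (line : String) (out : String) : Decidable (Spec_decompress_file line out) := by
  unfold Spec_decompress_file; infer_instance

-- ===== CLAIM (what is proved, stated in full; the proofs are below) =====
def Claim_equal_decompress_file : Prop := ∀ (line : String), Dom_decompress_file line →
  Pre_decompress_file line → Spec_decompress_file line (decompress_file line)

-- ===== LEMMAS AND PROOFS =====
theorem pv_join_nil_cons (x : List Char) (xs : List (List Char)) :
    PySem.Chars.join [] (x :: xs) = x ++ PySem.Chars.join [] xs := by
  cases xs with
  | nil =>
    rw [PySem.Chars.join_singleton, show PySem.Chars.join [] ([] : List (List Char)) = [] from rfl,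
      List.append_nil]
  | cons y ys => rw [PySem.Chars.join_cons_cons]; simp

-- A's marker scan reaches the first ')' and accumulates exactly the characters before it
theorem pvAScan_eq (l : List Char) :
    ∀ (k : Nat), ∀ (idx : Nat) (m : List Char) (fuel : Nat),
      PySem.List.index? (l.drop idx) ')' = some k → k < fuel →
      pvAScan l m idx fuel = (m ++ (l.drop idx).take k, idx + k) := by
  intro k
  induction k with
  | zero =>
    intro idx m fuel h hf
    have hmem : ')' ∈ l.drop idx := (PySem.List.index?_isSome_iff _ _).mp (by rw [h]; rfl)
    have hlt : idx < l.length := by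
      by_contra hn
      rw [List.drop_eq_nil_of_le (by omega)] at hmem; simp at hmem
    have hdrop : l.drop idx = l[idx] :: l.drop (idx + 1) := List.drop_eq_getElem_cons hlt
    rw [hdrop] at h
    have hc : l[idx] = ')' := by
      by_contra hne
      rw [PySem.List.index?_cons_of_ne _ hne] at h
      cases h' : PySem.List.index? (l.drop (idx + 1)) ')' <;> rw [h'] at h <;> simp at h
    obtain ⟨f, rfl⟩ : ∃ f, fuel = f + 1 := ⟨fuel - 1, by omega⟩
    have hget : PySem.List.pyGet? l (idx : Int) = some l[idx] := by
      rw [PySem.List.pyGet?_natCast, List.getElem?_eq_getElem hlt]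
    simp only [pvAScan, hget]
    rw [if_neg (by simp [hc])]
    simp
  | succ k ih =>
    intro idx m fuel h hf
    have hmem : ')' ∈ l.drop idx := (PySem.List.index?_isSome_iff _ _).mp (by rw [h]; rfl)
    have hlt : idx < l.length := by
      by_contra hn
      rw [List.drop_eq_nil_of_le (by omega)] at hmem; simp at hmem
    have hdrop : l.drop idx = l[idx] :: l.drop (idx + 1) := List.drop_eq_getElem_cons hlt
    rw [hdrop] at h
    have hne : l[idx] ≠ ')' := by
      intro hc
      rw [hc, PySem.List.index?_cons_self] at h; simp at h
    rw [PySem.List.index?_cons_of_ne _ hne] at h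
    have h' : PySem.List.index? (l.drop (idx + 1)) ')' = some k := by
      cases h'' : PySem.List.index? (l.drop (idx + 1)) ')' with
      | none => rw [h''] at h; simp at h
      | some v => rw [h''] at h; simp at h ⊢; omega
    obtain ⟨f, rfl⟩ : ∃ f, fuel = f + 1 := ⟨fuel - 1, by omega⟩
    have hget : PySem.List.pyGet? l (idx : Int) = some l[idx] := by
      rw [PySem.List.pyGet?_natCast, List.getElem?_eq_getElem hlt]
    have hrec := ih (idx + 1) (m ++ [l[idx]]) f h' (by omega)
    simp only [pvAScan, hget]
    rw [if_pos hne, hrec, hdrop, List.take_succ_cons]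
    simp [List.append_assoc]
    omega

-- A's guarded character-collecting for-loop is the truncating slice B takes
theorem pvStrRep_eq (l : List Char) (q n : Nat) (acc : List Char) :
    (PySem.List.pyRange (q : Int) ((q : Int) + (n : Int)) 1).foldl
        (fun s j => if j < (l.length : Int) then s ++ [PySem.List.pyGetD l j ' '] else s) acc
      = acc ++ (l.drop q).take n := by
  induction n generalizing acc with
  | zero => simp [PySem.List.pyRange]
  | succ n ih =>
    have hsplit : PySem.List.pyRange (q : Int) ((q : Int) + ((n : Int) + 1)) 1
        = PySem.List.pyRange (q : Int) ((q : Int) + (n : Int)) 1 ++ [(q : Int) + (n : Int)] := by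
      rw [← PySem.List.pyRange_one_succ_right (by omega)]; ring_nf
    have hcast : ((n + 1 : Nat) : Int) = (n : Int) + 1 := by push_cast; ring
    rw [hcast, hsplit, List.foldl_append, ih]
    have hqn : ((q : Int) + (n : Int)) = ((q + n : Nat) : Int) := by push_cast; ring
    simp only [List.foldl_cons, List.foldl_nil]
    by_cases hin : q + n < l.length
    · rw [if_pos (show ((q : Int) + (n : Int)) < (l.length : Int) by omega)]
      rw [hqn, PySem.List.pyGetD_natCast, List.getD_eq_getElem?_getD,
        List.getElem?_eq_getElem (show q + n < l.length by omega)]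
      rw [List.take_add_one, List.getElem?_drop,
        List.getElem?_eq_getElem (show q + n < l.length by omega)]
      simp
    · rw [if_neg (show ¬ ((q : Int) + (n : Int)) < (l.length : Int) by omega)]
      rw [List.take_of_length_le (by rw [List.length_drop]; omega),
        List.take_of_length_le (by rw [List.length_drop]; omega)]

-- the main loops agree step by step on every position the grammar of Pre_ certifies
theorem pvLoopEq (l : List Char) :
    ∀ (fuel : Nat) (iN : Nat) (acc : List Char),
      pvWellFormedFrom l iN fuel = true →
      pvALoop l acc (iN : Int) fuel = acc ++ PySem.Chars.join [] (pvBLoop l (iN : Int) fuel) := by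
  intro fuel
  induction fuel with
  | zero => intro iN acc _; simp [pvALoop, pvBLoop]
  | succ fuel ih =>
    intro iN acc hval
    by_cases hlt : iN < l.length
    · have hg : 0 ≤ (iN : Int) ∧ (iN : Int) < (l.length : Int) := by constructor <;> omega
      have hc : PySem.List.pyGetD l (iN : Int) ' ' = l[iN] := by
        rw [PySem.List.pyGetD_natCast, List.getD_eq_getElem?_getD,
          List.getElem?_eq_getElem hlt]; rfl
      have hcD : l.getD iN ' ' = l[iN] := by
        rw [List.getD_eq_getElem?_getD, List.getElem?_eq_getElem hlt]; rfl
      by_cases hpar : l[iN] = '('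
      · -- marker branch
        rw [pvWellFormedFrom, if_pos hlt, if_pos (by rw [hcD]; exact hpar)] at hval
        cases hmi : pvMarkerInfo l iN with
        | none => rw [hmi] at hval; simp at hval
        | some t =>
        obtain ⟨k0, a, b⟩ := t
        rw [hmi] at hval
        simp only [Bool.and_eq_true, decide_eq_true_eq] at hval
        obtain ⟨hanon, hnextval⟩ := hval
        -- unpack the marker-shape certificate
        rw [pvMarkerInfo] at hmi
        cases hk0 : PySem.List.index? (l.drop (iN + 1)) ')' with
        | none => rw [hk0] at hmi; simp at hmi
        | some k0' =>
        rw [hk0] at hmi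
        simp only at hmi
        cases hp0 : PySem.List.pyGet? (PySem.Chars.splitOn ((l.drop (iN + 1)).take k0') ['x']) 0 with
        | none => rw [hp0] at hmi; simp at hmi
        | some p0 =>
        cases hp1 : PySem.List.pyGet? (PySem.Chars.splitOn ((l.drop (iN + 1)).take k0') ['x']) 1 with
        | none => rw [hp0, hp1] at hmi; simp at hmi
        | some p1 =>
        rw [hp0, hp1] at hmi
        simp only at hmi
        cases ha : PySem.Int.ofChars? p0 with
        | none => rw [ha] at hmi; simp at hmi
        | some a' =>
        cases hb : PySem.Int.ofChars? p1 with
        | none => rw [ha, hb] at hmi; simp at hmi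
        | some b' =>
        rw [ha, hb] at hmi
        simp only [Option.some.injEq, Prod.mk.injEq] at hmi
        obtain ⟨hk0eq, haeq, hbeq⟩ := hmi
        subst hk0eq; subst haeq; subst hbeq
        obtain ⟨hk0len, -, -⟩ := PySem.List.getElem_of_index?_eq_some hk0
        have hdropiN : l.drop iN = l[iN] :: l.drop (iN + 1) := List.drop_eq_getElem_cons hlt
        have hBidx : PySem.List.index? (l.drop iN) ')' = some (k0' + 1) := by
          rw [hdropiN, PySem.List.index?_cons_of_ne _ (by rw [hpar]; decide), hk0]; rfl
        have hscan : pvAScan l [] (iN + 1) l.length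
            = ((l.drop (iN + 1)).take k0', iN + 1 + k0') :=
          pvAScan_eq l k0' (iN + 1) [] l.length hk0 (by simp at hk0len; omega)
        have htoNat : (((iN : Int)) + 1).toNat = iN + 1 := by omega
        have htoNat2 : ((iN : Int)).toNat = iN := by omega
        have hBslice : PySem.List.slice l (some ((iN : Int) + 1))
              (some ((iN : Int) + ((k0' + 1 : Nat) : Int)))
            = (l.drop (iN + 1)).take k0' := by
          have e1 : (iN : Int) + 1 = ((iN + 1 : Nat) : Int) := by push_cast; ring
          have e2 : (iN : Int) + ((k0' + 1 : Nat) : Int) = ((iN + 1 + k0' : Nat) : Int) := by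
            push_cast; ring
          rw [e2, e1, PySem.List.slice_natCast]
          congr 1
          omega
        have hcpar : PySem.List.pyGetD l ((iN : Int)) ' ' = '(' := by rw [hc]; exact hpar
        rw [pvALoop, pvBLoop, if_pos hg, if_pos hcpar]
        rw [htoNat2, hBidx]
        simp only [htoNat, hscan, hBslice]
        have hq : ((iN + 1 + k0' : Nat) : Int) + 1 = ((iN + k0' + 2 : Nat) : Int) := by
          push_cast; ring
        have hacast : a' = ((a'.toNat : Nat) : Int) := by omega
        have hchunk : (PySem.List.pyRange (((iN + 1 + k0' : Nat) : Int) + 1)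
              ((((iN + 1 + k0' : Nat) : Int)) + 1 + a') 1).foldl
              (fun s j => if j < (l.length : Int) then s ++ [PySem.List.pyGetD l j ' '] else s) []
            = (l.drop (iN + k0' + 2)).take a'.toNat := by
          rw [hq, hacast]
          exact pvStrRep_eq l (iN + k0' + 2) a'.toNat []
        have hBchunk : PySem.List.slice l (some ((iN : Int) + ((k0' + 1 : Nat) : Int) + 1))
              (some ((iN : Int) + ((k0' + 1 : Nat) : Int) + 1 + a'))
            = (l.drop (iN + k0' + 2)).take a'.toNat := by
          have e2 : (iN : Int) + ((k0' + 1 : Nat) : Int) + 1 + a'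
              = ((iN + k0' + 2 + a'.toNat : Nat) : Int) := by push_cast; omega
          have e1 : (iN : Int) + ((k0' + 1 : Nat) : Int) + 1 = ((iN + k0' + 2 : Nat) : Int) := by
            push_cast; ring
          rw [e2, e1, PySem.List.slice_natCast]
          congr 1
          omega
        have hnexteq1 : ((iN + 1 + k0' : Nat) : Int) + a' + 1
            = ((iN + k0' + 2 + a'.toNat : Nat) : Int) := by push_cast; omega
        have hnexteq2 : (iN : Int) + ((k0' + 1 : Nat) : Int) + 1 + a'
            = ((iN + k0' + 2 + a'.toNat : Nat) : Int) := by push_cast; omega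
        rw [if_pos hg, if_pos hcpar]
        simp only [hp0, hp1, ha, hb]
        rw [hchunk, hBchunk, hnexteq1, hnexteq2, ih _ _ hnextval, pv_join_nil_cons,
          List.append_assoc]
      · -- plain character branch
        rw [pvWellFormedFrom, if_pos hlt, if_neg (by rw [hcD]; exact hpar)] at hval
        have hcpar : ¬ PySem.List.pyGetD l ((iN : Int)) ' ' = '(' := by rw [hc]; exact hpar
        have hi1 : ((iN : Int)) + 1 = ((iN + 1 : Nat) : Int) := by push_cast; ring
        rw [pvALoop, pvBLoop, if_pos hg, if_neg hcpar, if_pos hg, if_neg hcpar, hi1,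
          ih _ _ hval, pv_join_nil_cons, List.append_assoc]
    · have hg : ¬ (0 ≤ (iN : Int) ∧ (iN : Int) < (l.length : Int)) := by omega
      rw [pvALoop, pvBLoop, if_neg hg, if_neg hg,
        show PySem.Chars.join [] ([] : List (List Char)) = [] from rfl, List.append_nil]

-- ===== VERDICT (by name: the statement is the Claim_ definition above) =====
theorem decompress_file_spec : Claim_equal_decompress_file := by
  intro line _ hpre
  unfold Spec_decompress_file decompress_file decompress_file_alt
  congr 1
  rw [Pre_decompress_file] at hpre
  simpa using pvLoopEq line.toList line.toList.length 0 [] hpre
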